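-- pv_equiv track=rewrite | github.com/manwar/perlweeklychallenge-club | challenge-170/mohammad-anwar/python/ch-1.py | primorial_numbers
-- ===== SOURCE A (Python) =====
-- import math
--
-- def is_prime(n):
--     if n == 1:
--         return 0
--
--     i = 2
--     while (i <= int(math.sqrt(n))):
--         if ((n % i) == 0):
--             return 0
--         i += 1
--
--     return 1
--
-- def primorial_numbers(n):
--     pn = []
--     i  = 0
--     j  = 1
--     while (len(pn) < n):
--         i = i + 1
--         if (is_prime(i) != 1):
--             continue
--         j = i * j
--         pn.append(j)
--
--     return pn
-- ===== SOURCE B (Python) =====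
-- def primorial_numbers(n):
--     pn = []
--     primes = []
--     prod = 1
--     cand = 2
--     while len(pn) < n:
--         is_p = True
--         for p in primes:
--             if p * p > cand:
--                 break
--             if cand % p == 0:
--                 is_p = False
--                 break
--         if is_p:
--             primes.append(cand)
--             prod = prod * cand
--             pn.append(prod)
--         cand = 3 if cand == 2 else cand + 2
--     return pn
-- ===== Notes on version B (the rewrite author's own statement) =====
-- stated objective: faster
-- what changed: A tests each candidate by trial division by every integer up to sqrt (recomputing math.sqrt each step); B maintains the list of primes found so far and tests each candidate (2 then odd numbers only) by dividing only by stored primes p with p*p <= candidate, keeping a running product.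
import Mathlib
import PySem

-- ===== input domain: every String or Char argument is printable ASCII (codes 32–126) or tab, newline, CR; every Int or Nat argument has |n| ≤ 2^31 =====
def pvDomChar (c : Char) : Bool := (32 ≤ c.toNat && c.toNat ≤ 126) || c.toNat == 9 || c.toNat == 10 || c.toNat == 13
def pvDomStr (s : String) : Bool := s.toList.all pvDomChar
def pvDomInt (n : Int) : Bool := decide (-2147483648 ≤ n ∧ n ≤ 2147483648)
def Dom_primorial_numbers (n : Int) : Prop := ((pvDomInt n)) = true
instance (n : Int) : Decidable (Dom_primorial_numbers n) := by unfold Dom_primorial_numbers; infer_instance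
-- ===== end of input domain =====

-- B replaces A's per-candidate trial division by all integers up to sqrt with trial division by
-- the stored list of primes found so far (stopping at p*p > candidate) over 2 and odd candidates
-- only, keeping a running product; measured faster by a constant factor.

-- ===== PORT A =====
-- A's counters are nonnegative Python ints; they are ported as Nat. int(math.sqrt(n)) is ported as
-- Nat.sqrt, exact on the magnitudes reachable in the domain (float sqrt is exact below 2^52).

-- the `while i <= int(math.sqrt(n))` loop of is_prime
def isPrimeGoA (n : Nat) (i : Nat) : Nat :=
  if i ≤ Nat.sqrt n then
    if n % i = 0 then 0 else isPrimeGoA n (i + 1)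
  else 1
termination_by Nat.sqrt n + 1 - i

def isPrimeA (n : Nat) : Nat := if n = 1 then 0 else isPrimeGoA n 2

-- correctness of A's primality test (cited by loopA's termination proof)
theorem isPrimeGoA_eq_one (n i : Nat) :
    isPrimeGoA n i = 1 ↔ ∀ d, i ≤ d → d ≤ Nat.sqrt n → n % d ≠ 0 := by
  induction i using isPrimeGoA.induct n with
  | case1 i hle hmod =>
      rw [isPrimeGoA, if_pos hle, if_pos hmod]
      constructor
      · intro h; omega
      · intro h; exact absurd hmod (h i le_rfl hle)
  | case2 i hle hmod ih =>
      rw [isPrimeGoA, if_pos hle, if_neg hmod]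
      rw [ih]
      constructor
      · intro h d hd1 hd2
        rcases Nat.eq_or_lt_of_le hd1 with rfl | hlt
        · exact hmod
        · exact h d hlt hd2
      · intro h d hd1 hd2; exact h d (by omega) hd2
  | case3 i hle =>
      rw [isPrimeGoA, if_neg hle]
      constructor
      · intro _ d hd1 hd2; omega
      · intro _; rfl

theorem isPrimeA_eq_one (n : Nat) (hn : 1 ≤ n) : isPrimeA n = 1 ↔ n.Prime := by
  unfold isPrimeA
  rcases Nat.eq_or_lt_of_le hn with rfl | h2
  · simp [Nat.not_prime_one]
  · rw [if_neg (by omega), isPrimeGoA_eq_one]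
    constructor
    · intro h
      by_contra hnp
      have hq := Nat.minFac_prime (by omega : n ≠ 1)
      have hdvd := Nat.minFac_dvd n
      have hsq : n.minFac * n.minFac ≤ n := by
        have := Nat.minFac_sq_le_self (by omega : 0 < n) hnp
        simpa [pow_two] using this
      exact h n.minFac hq.two_le (Nat.le_sqrt.mpr hsq) (Nat.mod_eq_zero_of_dvd hdvd)
    · intro hp d hd1 hd2 hmod
      have hdvd : d ∣ n := Nat.dvd_of_mod_eq_zero hmod
      rcases (Nat.Prime.eq_one_or_self_of_dvd hp d hdvd) with rfl | rfl
      · omega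
      · have := Nat.sqrt_lt_self (by omega : 1 < d)
        omega

-- least prime ≥ i (used only in termination measures and in the spec-level lemmas)
def nextP (i : Nat) : Nat := Nat.find (Nat.exists_infinite_primes i)

theorem nextP_ge (i : Nat) : i ≤ nextP i := (Nat.find_spec (Nat.exists_infinite_primes i)).1

theorem nextP_prime (i : Nat) : (nextP i).Prime := (Nat.find_spec (Nat.exists_infinite_primes i)).2

theorem nextP_min (i p : Nat) (h1 : i ≤ p) (h2 : p.Prime) : nextP i ≤ p :=
  Nat.find_min' _ ⟨h1, h2⟩

theorem nextP_shift (i : Nat) (h : ¬ i.Prime) : nextP i = nextP (i + 1) := by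
  apply le_antisymm
  · exact nextP_min i _ (by have := nextP_ge (i+1); omega) (nextP_prime (i+1))
  · apply nextP_min
    · have h1 := nextP_ge i
      rcases Nat.eq_or_lt_of_le h1 with he | hlt
      · exact absurd (he ▸ nextP_prime i) h
      · omega
    · exact nextP_prime i

-- A's main while loop
def loopA (n : Int) (pn : List Int) (i : Nat) (j : Int) : List Int :=
  if _h1 : (pn.length : Int) < n then
    if h2 : isPrimeA (i + 1) ≠ 1 then
      loopA n pn (i + 1) j
    else
      loopA n (pn ++ [((i + 1 : Nat) : Int) * j]) (i + 1) (((i + 1 : Nat) : Int) * j)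
  else pn
termination_by ((n - pn.length).toNat, nextP (i + 1) - i)
decreasing_by
  · apply Prod.Lex.right
    have hnp : ¬ (i + 1).Prime := fun hp => h2 ((isPrimeA_eq_one (i+1) (by omega)).mpr hp)
    have hs := nextP_shift (i + 1) hnp
    have hg := nextP_ge (i + 1)
    have _hne : nextP (i + 1) ≠ i + 1 := fun he => hnp (he ▸ nextP_prime (i + 1))
    omega
  · apply Prod.Lex.left
    simp only [List.length_append, List.length_cons, List.length_nil]
    omega

def primorial_numbers (n : Int) : List Int := loopA n [] 0 1

-- ===== PORT B =====
-- the candidate stepping of Source B: `cand = 3 if cand == 2 else cand + 2`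
def nextC (c : Nat) : Nat := if c = 2 then 3 else c + 2

-- the `for p in primes: …` inner loop of Source B (break on p*p > cand, divisor found ⇒ not prime)
def testB : List Nat → Nat → Bool
  | [], _ => true
  | p :: ps, c => if c < p * p then true else if c % p = 0 then false else testB ps c

-- invariant threaded through loopB, used only to justify termination: primes is exactly the list
-- of primes below cand, and cand is 2 or an odd number ≥ 3
def InvB (ps : List Nat) (cand : Nat) : Prop :=
  ps = (List.range cand).filter (fun m => decide m.Prime) ∧ (cand = 2 ∨ (3 ≤ cand ∧ cand % 2 = 1))

theorem testB_true_of_prime (c : Nat) (hc : c.Prime) :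
    ∀ l : List Nat, (∀ p ∈ l, 2 ≤ p ∧ p < c) → testB l c = true := by
  intro l
  induction l with
  | nil => intro _; rfl
  | cons p ps ih =>
      intro h
      rw [testB]
      split
      · rfl
      · have hp := h p (by simp)
        split
        · rename_i hmod
          have hdvd : p ∣ c := Nat.dvd_of_mod_eq_zero hmod
          rcases hc.eq_one_or_self_of_dvd p hdvd with rfl | rfl
          · omega
          · omega
        · exact ih (fun q hq => h q (by simp [hq]))

theorem testB_false_of_mem (c : Nat) :
    ∀ l : List Nat, l.Pairwise (· < ·) →
    ∀ q, q ∈ l → q ∣ c → q * q ≤ c → testB l c = false := by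
  intro l
  induction l with
  | nil => intro _ q hq; simp at hq
  | cons p ps ih =>
      intro hpw q hq hdvd hsq
      rw [testB]
      rcases List.mem_cons.mp hq with rfl | hq'
      · rw [if_neg (by omega), if_pos (Nat.mod_eq_zero_of_dvd hdvd)]
      · have hlt : p < q := (List.pairwise_cons.mp hpw).1 q hq'
        rw [if_neg (by nlinarith)]
        split
        · rfl
        · exact ih hpw.of_cons q hq' hdvd hsq

theorem mem_primesBelow {p c : Nat} :
    p ∈ (List.range c).filter (fun m => decide m.Prime) ↔ p < c ∧ p.Prime := by
  simp [List.mem_filter, List.mem_range]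

theorem primesBelow_pairwise (c : Nat) :
    ((List.range c).filter (fun m => decide m.Prime)).Pairwise (· < ·) :=
  List.Pairwise.sublist List.filter_sublist List.pairwise_lt_range

theorem testB_prime {ps : List Nat} {c : Nat}
    (hps : ps = (List.range c).filter (fun m => decide m.Prime)) (hc : 2 ≤ c)
    (ht : testB ps c = true) : c.Prime := by
  by_contra hnp
  have hq := Nat.minFac_prime (by omega : c ≠ 1)
  have hdvd := Nat.minFac_dvd c
  have hsq : c.minFac * c.minFac ≤ c := by
    have := Nat.minFac_sq_le_self (by omega : 0 < c) hnp
    simpa [pow_two] using this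
  have hlt : c.minFac < c := by nlinarith [hq.two_le]
  have hmem : c.minFac ∈ ps := hps ▸ mem_primesBelow.mpr ⟨hlt, hq⟩
  rw [testB_false_of_mem c ps (hps ▸ primesBelow_pairwise c) c.minFac hmem hdvd hsq] at ht
  simp at ht

theorem testB_not_prime {ps : List Nat} {c : Nat}
    (hps : ps = (List.range c).filter (fun m => decide m.Prime))
    (hf : testB ps c = false) : ¬ c.Prime := by
  intro hp
  rw [testB_true_of_prime c hp ps
    (fun p hm => by
      have := mem_primesBelow.mp (hps ▸ hm)
      exact ⟨this.2.two_le, this.1⟩)] at hf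
  simp at hf

theorem invB_false_facts {ps : List Nat} {cand : Nat} (h : InvB ps cand)
    (hf : testB ps cand = false) :
    3 ≤ cand ∧ cand % 2 = 1 ∧ ¬ cand.Prime ∧ ¬ (cand + 1).Prime := by
  obtain ⟨hps, hodd⟩ := h
  have hne2 : cand ≠ 2 := by
    rintro rfl
    rw [show ps = [] by simpa using hps] at hf
    simp [testB] at hf
  have h3 : 3 ≤ cand ∧ cand % 2 = 1 := by rcases hodd with h | h <;> omega
  have hnp : ¬ cand.Prime := testB_not_prime hps hf
  refine ⟨h3.1, h3.2, hnp, fun hp => ?_⟩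
  have := (Nat.Prime.even_iff hp).mp ⟨(cand + 1) / 2, by omega⟩
  omega

theorem not_prime_succ_of_odd {c : Nat} (h3 : 3 ≤ c) (hodd : c % 2 = 1) : ¬ (c + 1).Prime := by
  intro hp
  have := (Nat.Prime.even_iff hp).mp ⟨(c + 1) / 2, by omega⟩
  omega

theorem primesBelow_succ_prime {c : Nat} (hp : c.Prime) :
    (List.range (c + 1)).filter (fun m => decide m.Prime)
      = (List.range c).filter (fun m => decide m.Prime) ++ [c] := by
  rw [List.range_succ, List.filter_append]
  simp [hp]

theorem primesBelow_succ_not_prime {c : Nat} (hp : ¬ c.Prime) :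
    (List.range (c + 1)).filter (fun m => decide m.Prime)
      = (List.range c).filter (fun m => decide m.Prime) := by
  rw [List.range_succ, List.filter_append]
  simp [hp]

theorem invB_true {ps : List Nat} {cand : Nat} (h : InvB ps cand) (ht : testB ps cand = true) :
    InvB (ps ++ [cand]) (nextC cand) := by
  obtain ⟨hps, hodd⟩ := h
  have hc2 : 2 ≤ cand := by rcases hodd with h | h <;> omega
  have hp : cand.Prime := testB_prime hps hc2 ht
  unfold nextC
  constructor
  · split
    · rename_i he
      subst he
      rw [show ps = [] by simpa using hps]
      decide
    · rename_i _hne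
      have h3 : 3 ≤ cand ∧ cand % 2 = 1 := by rcases hodd with h | h <;> omega
      rw [show cand + 2 = (cand + 1) + 1 by rfl,
        primesBelow_succ_not_prime (not_prime_succ_of_odd h3.1 h3.2),
        primesBelow_succ_prime hp, hps]
  · split
    · right; omega
    · rcases hodd with h | h
      · exact absurd h (by assumption)
      · right; omega

theorem invB_false {ps : List Nat} {cand : Nat} (h : InvB ps cand) (hf : testB ps cand = false) :
    InvB ps (nextC cand) := by
  obtain ⟨h3, hodd, hnp, hnp1⟩ := invB_false_facts h hf
  unfold nextC
  rw [if_neg (by omega)]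
  refine ⟨?_, Or.inr (by omega)⟩
  rw [show cand + 2 = (cand + 1) + 1 by rfl,
    primesBelow_succ_not_prime hnp1, primesBelow_succ_not_prime hnp, h.1]

-- B's main while loop; the invariant argument only makes termination provable
def loopB (n : Int) (pn : List Int) (ps : List Nat) (prod : Int) (cand : Nat)
    (h : InvB ps cand) : List Int :=
  if h1 : (pn.length : Int) < n then
    if ht : testB ps cand then
      loopB n (pn ++ [prod * (cand : Int)]) (ps ++ [cand]) (prod * (cand : Int))
        (nextC cand) (invB_true h ht)
    else
      loopB n pn ps prod (nextC cand)
        (invB_false h (by simpa using ht))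
  else pn
termination_by ((n - pn.length).toNat, nextP cand - cand)
decreasing_by
  · apply Prod.Lex.left
    simp only [List.length_append, List.length_cons, List.length_nil]
    omega
  · apply Prod.Lex.right
    obtain ⟨_h3, hodd, hnp, hnp1⟩ := invB_false_facts h (by simpa using ht)
    rw [show nextC cand = cand + 2 from if_neg (by omega)]
    have hs1 := nextP_shift cand hnp
    have hs2 := nextP_shift (cand + 1) hnp1
    have hge2 : cand + 2 ≤ nextP cand := by
      have hg := nextP_ge cand
      have ha : nextP cand ≠ cand := fun he => hnp (he ▸ nextP_prime cand)
      have hb : nextP cand ≠ cand + 1 := fun he => hnp1 (he ▸ nextP_prime cand)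
      omega
    rw [← hs2, ← hs1]
    omega

def primorial_numbers_alt (n : Int) : List Int :=
  loopB n [] [] 1 2 ⟨by decide, Or.inl rfl⟩

-- ===== PRECONDITION & SPEC =====
def Spec_primorial_numbers (n : Int) (out : List Int) : Prop := out = primorial_numbers_alt n
instance (n : Int) (out : List Int) : Decidable (Spec_primorial_numbers n out) := by unfold Spec_primorial_numbers; infer_instance

-- ===== CLAIM (what is proved, stated in full; the proofs are below) =====
def Claim_equal_primorial_numbers : Prop := ∀ (n : Int), Dom_primorial_numbers n → Spec_primorial_numbers n (primorial_numbers n)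

-- ===== LEMMAS AND PROOFS =====

theorem nextP_self (i : Nat) (h : i.Prime) : nextP i = i :=
  le_antisymm (nextP_min i i le_rfl h) (nextP_ge i)

-- the common mathematical description: k more running products of primes, next candidate ≥ i
def specLoop : Nat → Nat → Int → List Int
  | 0, _, _ => []
  | k + 1, i, j => ((nextP i : Int) * j) :: specLoop k (nextP i + 1) ((nextP i : Int) * j)

theorem specLoop_shift (k i : Nat) (j : Int) (h : ¬ i.Prime) :
    specLoop k i j = specLoop k (i + 1) j := by
  cases k with
  | zero => rfl
  | succ k => simp [specLoop, nextP_shift i h]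

theorem specLoop_prime (k i : Nat) (j : Int) (h : i.Prime) :
    specLoop (k + 1) i j = ((i : Int) * j) :: specLoop k (i + 1) ((i : Int) * j) := by
  simp [specLoop, nextP_self i h]

theorem loopA_eq (n : Int) (pn : List Int) (i : Nat) (j : Int) :
    loopA n pn i j = pn ++ specLoop (n - pn.length).toNat (i + 1) j := by
  induction pn, i, j using loopA.induct n with
  | case1 pn i j h1 h2 ih =>
      rw [loopA, dif_pos h1, dif_pos h2, ih]
      have hnp : ¬ (i + 1).Prime := fun hp => h2 ((isPrimeA_eq_one (i+1) (by omega)).mpr hp)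
      rw [specLoop_shift _ _ _ hnp]
  | case2 pn i j h1 h2 ih =>
      rw [loopA, dif_pos h1, dif_neg h2, ih]
      have hp : (i + 1).Prime := by
        by_contra hnp
        exact h2 (fun he => hnp ((isPrimeA_eq_one (i+1) (by omega)).mp he))
      have hg : (n - (pn.length : Int)).toNat = ((n - ((pn.length : Int) + 1)).toNat) + 1 := by
        omega
      rw [hg, specLoop_prime _ _ _ hp]
      simp only [List.length_append, List.length_cons, List.length_nil, List.append_assoc,
        List.cons_append, List.nil_append]
      push_cast
      ring_nf
  | case3 pn i j h1 =>
      rw [loopA, dif_neg h1]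
      rw [show (n - (pn.length : Int)).toNat = 0 by omega]
      simp [specLoop]

theorem loopB_eq (n : Int) (pn : List Int) (ps : List Nat) (prod : Int) (cand : Nat)
    (h : InvB ps cand) :
    loopB n pn ps prod cand h = pn ++ specLoop (n - pn.length).toNat cand prod := by
  induction pn, ps, prod, cand, h using loopB.induct n with
  | case1 pn ps prod cand h h1 ht ih =>
      rw [loopB, dif_pos h1, dif_pos ht, ih]
      have hc2 : 2 ≤ cand := by rcases h.2 with h' | h' <;> omega
      have hp : cand.Prime := testB_prime h.1 hc2 ht
      have hg : (n - (pn.length : Int)).toNat = ((n - ((pn.length : Int) + 1)).toNat) + 1 := by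
        omega
      rw [hg, specLoop_prime _ _ _ hp]
      have hnext : specLoop ((n - ((pn.length : Int) + 1)).toNat) (cand + 1) ((cand : Int) * prod)
          = specLoop ((n - ((pn.length : Int) + 1)).toNat)
              (nextC cand) ((cand : Int) * prod) := by
        by_cases he : cand = 2
        · subst he; rfl
        · rw [show nextC cand = cand + 2 from if_neg he]
          have h3 : 3 ≤ cand ∧ cand % 2 = 1 := by rcases h.2 with h' | h' <;> omega
          exact specLoop_shift _ _ _ (not_prime_succ_of_odd h3.1 h3.2)
      rw [hnext]
      simp only [List.length_append, List.length_cons, List.length_nil, List.append_assoc,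
        List.cons_append, List.nil_append]
      push_cast
      ring_nf
  | case2 pn ps prod cand h h1 ht ih =>
      rw [loopB, dif_pos h1, dif_neg ht, ih]
      obtain ⟨h3, hodd, hnp, hnp1⟩ := invB_false_facts h (by simpa using ht)
      rw [show nextC cand = cand + 2 from if_neg (by omega)]
      rw [← specLoop_shift _ _ _ hnp1, ← specLoop_shift _ _ _ hnp]
  | case3 pn ps prod cand h h1 =>
      rw [loopB, dif_neg h1]
      rw [show (n - (pn.length : Int)).toNat = 0 by omega]
      simp [specLoop]

-- ===== VERDICT (by name: the statement is the Claim_ definition above) =====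
theorem primorial_numbers_spec : Claim_equal_primorial_numbers := by
  intro n _
  unfold Spec_primorial_numbers primorial_numbers primorial_numbers_alt
  rw [loopA_eq, loopB_eq]
  simp only [List.length_nil, List.nil_append, Nat.cast_zero]
  rw [specLoop_shift _ 1 1 Nat.not_prime_one]
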